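-- pv_equiv track=rewrite | github.com/eddmpython/dartlab | experiments/063_tableMapper/005_subtableSplit.py | splitSubtables
-- ===== SOURCE A (Python) =====
-- def splitSubtables(md: str) -> list[list[str]]:
--     """markdown 텍스트에서 구분선(---) 기준으로 서브테이블 분리.
--
--     Returns: 서브테이블별 줄 리스트. 각 서브테이블은 [헤더, 구분선, 데이터...].
--     """
--     tables: list[list[str]] = []
--     current: list[str] = []
--
--     for line in md.strip().split("\n"):
--         stripped = line.strip()
--         if not stripped.startswith("|"):
--             if current:
--                 tables.append(current)
--                 current = []
--             continue
--
--         cells = [c.strip() for c in stripped.strip("|").split("|")]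
--         isSep = all(set(c.strip()) <= {"-", ":"} for c in cells if c.strip())
--
--         if isSep and current:
--             # 구분선 직전이 헤더 → 새 서브테이블 시작
--             # 직전 줄이 현재 테이블의 헤더인지, 새 테이블의 헤더인지 판단
--             # 규칙: current의 마지막 줄이 헤더, 이 줄이 구분선 → 새 서브테이블 시작
--             if len(current) >= 2:
--                 # 이전 서브테이블은 마지막 줄(헤더) 제외하고 저장
--                 prevTable = current[:-1]
--                 if prevTable:
--                     tables.append(prevTable)
--                 # 새 서브테이블: 헤더 + 구분선
--                 current = [current[-1], stripped]
--             else: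
--                 # current에 1줄만 있으면 그게 헤더
--                 current.append(stripped)
--         else:
--             current.append(stripped)
--
--     if current:
--         tables.append(current)
--
--     return tables
-- ===== SOURCE B (Python) =====
-- def _isSep(stripped):
--     cells = [c.strip() for c in stripped.strip("|").split("|")]
--     return all(set(c) <= {"-", ":"} for c in cells if c)
--
--
-- def splitSubtables(md: str) -> list[list[str]]:
--     """Two-pass variant: partition stripped lines into maximal pipe-started blocks,
--     then cut each block at separator lines with a start pointer."""
--     lines = [ln.strip() for ln in md.strip().split("\n")]
--     blocks: list[list[str]] = []
--     blk: list[str] = []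
--     for s in lines:
--         if s.startswith("|"):
--             blk.append(s)
--         elif blk:
--             blocks.append(blk)
--             blk = []
--     if blk:
--         blocks.append(blk)
--
--     tables: list[list[str]] = []
--     for block in blocks:
--         start = 0
--         for i in range(len(block)):
--             if _isSep(block[i]) and i - start >= 2:
--                 tables.append(block[start:i - 1])
--                 start = i - 1
--         tables.append(block[start:])
--     return tables
-- ===== Notes on version B (the rewrite author's own statement) =====
-- stated objective: alternative
-- what changed: A's single fused loop that flushes/cuts while walking the lines is replaced by two passes: first partition the stripped lines into maximal blocks of pipe-started lines, then cut each block at separator lines using an index and a start pointer, emitting slices.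
import Mathlib
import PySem

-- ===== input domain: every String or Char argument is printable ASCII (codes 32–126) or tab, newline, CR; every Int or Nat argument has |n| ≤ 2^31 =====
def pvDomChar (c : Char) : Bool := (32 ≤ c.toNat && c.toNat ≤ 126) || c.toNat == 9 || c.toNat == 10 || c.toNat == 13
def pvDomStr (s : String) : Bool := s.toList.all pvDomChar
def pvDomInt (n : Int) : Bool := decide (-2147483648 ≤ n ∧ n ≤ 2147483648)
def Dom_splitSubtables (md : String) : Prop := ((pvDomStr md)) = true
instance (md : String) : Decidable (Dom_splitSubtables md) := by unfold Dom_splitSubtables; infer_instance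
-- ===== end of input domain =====

-- B replaces A's fused flush-and-cut loop by two passes (partition into '|'-blocks, then cut each
-- block at separator lines with an index/start pointer); alternative decomposition, same cost.

-- ===== PORT A =====
-- shared cell predicate: `all(set(c.strip()) <= {"-", ":"} for c in cells if c.strip())` where
-- cells = [c.strip() for c in stripped.strip("|").split("|")]; the cells are already stripped, so
-- Python's second `c.strip()` is the identity (PySem.Chars.strip is idempotent).
def pyIsSep (stripped : List Char) : Bool :=
  let cells := ((PySem.Chars.split? (PySem.Chars.stripChars stripped ['|']) ['|']).getD []).map
      PySem.Chars.strip
  cells.all (fun c => c.isEmpty || c.all (fun ch => ch == '-' || ch == ':'))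

-- the `for line in …` loop of A, with its (tables, current) state
def loopA (lines : List (List Char)) (tables : List (List (List Char)))
    (current : List (List Char)) : List (List (List Char)) :=
  match lines with
  | [] => if current = [] then tables else tables ++ [current]
  | line :: rest =>
    let stripped := PySem.Chars.strip line
    if ¬ PySem.Chars.startswith stripped ['|'] then
      loopA rest (if current = [] then tables else tables ++ [current]) []
    else if pyIsSep stripped ∧ current ≠ [] then
      if current.length ≥ 2 then
        let prevTable := current.dropLast
        loopA rest (if prevTable = [] then tables else tables ++ [prevTable])
          [current.getLast!, stripped]
      else
        loopA rest tables (current ++ [stripped])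
    else
      loopA rest tables (current ++ [stripped])

def splitSubtables (md : String) : List (List String) :=
  -- md.strip().split("\n"); split? is none only for sep = "", and the sep is "\n"
  let rawLines := (PySem.Chars.split? (PySem.Chars.strip md.toList) ['\n']).getD []
  (loopA rawLines [] []).map (fun t => t.map String.ofList)

-- ===== PORT B =====
-- first pass of Source B: partition the stripped lines into maximal runs starting with '|'
def blocksB (lines : List (List Char)) (blk : List (List Char)) : List (List (List Char)) :=
  match lines with
  | [] => if blk = [] then [] else [blk]
  | s :: rest =>
    if PySem.Chars.startswith s ['|'] then blocksB rest (blk ++ [s])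
    else if blk = [] then blocksB rest blk else blk :: blocksB rest []

-- second pass of Source B: `for i in range(len(block))` with the start pointer; the slices
-- block[start:i-1] and block[start:] have Nat bounds, so they are drop/take (slice_natCast)
def cutGo (block : List (List Char)) (i start : Nat) (tables : List (List (List Char))) :
    List (List (List Char)) :=
  if h : i < block.length then
    if pyIsSep block[i] ∧ i - start ≥ 2 then
      cutGo block (i + 1) (i - 1) (tables ++ [(block.drop start).take (i - 1 - start)])
    else
      cutGo block (i + 1) start tables
  else
    tables ++ [block.drop start]
termination_by block.length - i

def splitSubtables_alt (md : String) : List (List String) :=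
  let lines := ((PySem.Chars.split? (PySem.Chars.strip md.toList) ['\n']).getD []).map
      PySem.Chars.strip
  let blocks := blocksB lines []
  (blocks.foldl (fun tables block => cutGo block 0 0 tables) []).map (fun t => t.map String.ofList)

-- ===== PRECONDITION & SPEC =====
def Spec_splitSubtables (md : String) (out : List (List String)) : Prop := out = splitSubtables_alt md
instance (md : String) (out : List (List String)) : Decidable (Spec_splitSubtables md out) := by unfold Spec_splitSubtables; infer_instance

-- ===== CLAIM (what is proved, stated in full; the proofs are below) =====
def Claim_equal_splitSubtables : Prop := ∀ (md : String), Dom_splitSubtables md → Spec_splitSubtables md (splitSubtables md)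

-- ===== LEMMAS AND PROOFS =====

-- one in-block step of A's loop, acting on (already emitted pieces, current segment)
def stepCut (st : List (List (List Char)) × List (List Char)) (s : List Char) :
    List (List (List Char)) × List (List Char) :=
  if pyIsSep s ∧ st.2.length ≥ 2 then (st.1 ++ [st.2.dropLast], [st.2.getLast!, s])
  else (st.1, st.2 ++ [s])

-- A's loop with the already-collected tables stripped off
def midS (lines : List (List Char)) (cur : List (List Char)) : List (List (List Char)) :=
  match lines with
  | [] => if cur = [] then [] else [cur]
  | s :: rest =>
    if ¬ PySem.Chars.startswith s ['|'] then (if cur = [] then [] else [cur]) ++ midS rest []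
    else if pyIsSep s ∧ cur.length ≥ 2 then cur.dropLast :: midS rest [cur.getLast!, s]
    else midS rest (cur ++ [s])

theorem loopA_eq_midS (lines : List (List Char)) (tables : List (List (List Char)))
    (cur : List (List Char)) :
    loopA lines tables cur = tables ++ midS (lines.map PySem.Chars.strip) cur := by
  induction lines generalizing tables cur with
  | nil => simp only [loopA, midS, List.map_nil]; split <;> simp
  | cons line rest ih =>
    simp only [loopA, midS, List.map_cons]
    by_cases hsw : PySem.Chars.startswith (PySem.Chars.strip line) ['|']
    · simp only [hsw, not_true_eq_false, if_false]
      by_cases hsep : pyIsSep (PySem.Chars.strip line) ∧ cur ≠ []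
      · have hc : cur ≠ [] := hsep.2
        by_cases hlen : cur.length ≥ 2
        · have h2 : pyIsSep (PySem.Chars.strip line) ∧ cur.length ≥ 2 := ⟨hsep.1, hlen⟩
          have hdl : cur.dropLast ≠ [] := by
            intro h; have := congrArg List.length h; simp at this; omega
          simp only [hsep, hlen, if_true, hdl, ite_false, ih]
          simp [hc]
        · have h2 : ¬ (pyIsSep (PySem.Chars.strip line) ∧ cur.length ≥ 2) := by
            intro h; exact hlen h.2
          simp only [hsep, hlen, ite_false, ih]
          simp
      · by_cases h2 : pyIsSep (PySem.Chars.strip line) ∧ cur.length ≥ 2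
        · exfalso; apply hsep
          exact ⟨h2.1, by intro h; subst h; simp at h2⟩
        · simp only [hsep, if_false, ih]
          simp [h2]
    · simp only [hsw, ih]
      by_cases hc : cur = [] <;> simp [hc]

theorem stepCut_fst_append (l : List (List Char)) (p e : List (List (List Char)))
    (c : List (List Char)) :
    List.foldl stepCut (p ++ e, c) l =
      (p ++ (List.foldl stepCut (e, c) l).1, (List.foldl stepCut (e, c) l).2) := by
  induction l generalizing e c with
  | nil => rfl
  | cons s r ih =>
    simp only [List.foldl_cons, stepCut]
    split <;> simp [ih, List.append_assoc]

theorem cutGo_spec (block : List (List Char)) (i start : Nat) (tables : List (List (List Char)))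
    (h1 : start ≤ i) (h2 : i ≤ block.length) :
    cutGo block i start tables =
      tables ++
        ((List.foldl stepCut ([], (block.drop start).take (i - start)) (block.drop i)).1 ++
          [(List.foldl stepCut ([], (block.drop start).take (i - start)) (block.drop i)).2]) := by
  have main : ∀ (n i start : Nat) (tables : List (List (List Char))), block.length - i = n →
      start ≤ i → i ≤ block.length →
      cutGo block i start tables =
        tables ++
          ((List.foldl stepCut ([], (block.drop start).take (i - start)) (block.drop i)).1 ++
            [(List.foldl stepCut ([], (block.drop start).take (i - start)) (block.drop i)).2]) := by
    intro n
    induction n with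
    | zero =>
      intro i start tables hn h1 h2
      have hi : i = block.length := by omega
      subst hi
      unfold cutGo
      rw [dif_neg (by omega)]
      have hseg : (block.drop start).take (block.length - start) = block.drop start := by
        apply List.take_of_length_le; simp
      simp [hseg]
    | succ n ihn =>
      intro i start tables hn h1 h2
      have hi : i < block.length := by omega
      have hdropi : block.drop i = block[i] :: block.drop (i + 1) :=
        List.drop_eq_getElem_cons hi
      have hseglen : ((block.drop start).take (i - start)).length = i - start := by
        simp; omega
      unfold cutGo
      rw [dif_pos hi]
      by_cases hc : pyIsSep block[i] ∧ i - start ≥ 2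
      · rw [if_pos hc]
        rw [ihn (i + 1) (i - 1) _ (by omega) (by omega) (by omega)]
        rw [hdropi, List.foldl_cons]
        have hstep : stepCut ([], (block.drop start).take (i - start)) block[i] =
            ([((block.drop start).take (i - start)).dropLast],
              [((block.drop start).take (i - start)).getLast!, block[i]]) := by
          unfold stepCut
          rw [if_pos ⟨hc.1, by rw [hseglen]; exact hc.2⟩]
          simp
        -- (a) dropping the last line of block[start:i] is block[start:i-1]
        have ha : ((block.drop start).take (i - start)).dropLast =
            (block.drop start).take (i - 1 - start) := by
          rw [List.dropLast_eq_take, List.take_take, hseglen]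
          congr 1
          omega
        -- (b) the last line of block[start:i] is block[i-1]
        have hlast : ((block.drop start).take (i - start)).getLast! = block[i - 1]'(by omega) := by
          have hne : (block.drop start).take (i - start) ≠ [] := by
            intro h; have := congrArg List.length h; rw [hseglen] at this; simp at this; omega
          have hq : ((block.drop start).take (i - start)).getLast? =
              some (block[i - 1]'(by omega)) := by
            rw [List.getLast?_eq_getElem?, hseglen]
            rw [List.getElem?_take]
            rw [if_pos (by omega)]
            rw [List.getElem?_drop]
            rw [show start + (i - start - 1) = i - 1 by omega]
            rw [List.getElem?_eq_getElem (show i - 1 < block.length by omega)]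
          rw [List.getLast!_eq_getLast?_getD, hq, Option.getD_some]
        -- (c) block[i-1:i+1] = [block[i-1], block[i]]
        have hseg' : (block.drop (i - 1)).take (i + 1 - (i - 1)) =
            [block[i - 1]'(by omega), block[i]] := by
          have e1 := List.drop_eq_getElem_cons (l := block) (i := i - 1) (by omega)
          rw [show i - 1 + 1 = i by omega] at e1
          rw [e1, hdropi]
          have e3 : i + 1 - (i - 1) = 2 := by omega
          rw [e3]
          rfl
        rw [hstep, hseg', ← hlast]
        have hsplit := stepCut_fst_append (block.drop (i + 1))
          [((block.drop start).take (i - start)).dropLast] []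
          [((block.drop start).take (i - start)).getLast!, block[i]]
        simp only [List.append_nil] at hsplit
        rw [hsplit]
        simp [ha, List.append_assoc]
      · rw [if_neg hc]
        rw [ihn (i + 1) start _ (by omega) (by omega) (by omega)]
        rw [hdropi, List.foldl_cons]
        have hstep : stepCut ([], (block.drop start).take (i - start)) block[i] =
            ([], (block.drop start).take (i - start) ++ [block[i]]) := by
          unfold stepCut
          rw [if_neg (by rw [hseglen]; exact hc)]
        have hext : (block.drop start).take (i - start) ++ [block[i]] =
            (block.drop start).take (i + 1 - start) := by
          have e1 : i + 1 - start = (i - start) + 1 := by omega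
          rw [e1, List.take_add_one]
          congr 1
          have : (block.drop start)[i - start]? = some block[i] := by
            rw [List.getElem?_drop]
            rw [show start + (i - start) = i by omega]
            rw [List.getElem?_eq_getElem hi]
          rw [this]
          rfl
        rw [hstep, hext]
  exact main (block.length - i) i start tables rfl h1 h2

theorem stepCut_snd_ne (l : List (List Char)) (e : List (List (List Char)))
    (c : List (List Char)) (h : c ≠ [] ∨ l ≠ []) :
    (List.foldl stepCut (e, c) l).2 ≠ [] := by
  induction l generalizing e c with
  | nil => simpa using h
  | cons s r ih =>
    simp only [List.foldl_cons, stepCut]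
    split <;> exact ih _ _ (Or.inl (by simp))

theorem blocksB_eq_midS (rest blk : List (List Char)) :
    (blocksB rest blk).flatMap
        (fun b => (List.foldl stepCut ([], []) b).1 ++ [(List.foldl stepCut ([], []) b).2]) =
      (List.foldl stepCut ([], []) blk).1 ++ midS rest (List.foldl stepCut ([], []) blk).2 := by
  induction rest generalizing blk with
  | nil =>
    unfold blocksB
    by_cases hb : blk = []
    · subst hb; simp [midS]
    · rw [if_neg hb]
      have hC : (List.foldl stepCut ([], []) blk).2 ≠ [] :=
        stepCut_snd_ne blk [] [] (Or.inr hb)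
      simp [midS, hC]
  | cons s r ih =>
    by_cases hsw : PySem.Chars.startswith s ['|']
    · simp only [blocksB, midS, hsw, if_true, not_true_eq_false, if_false]
      rw [ih (blk ++ [s]), List.foldl_append]
      simp only [List.foldl_cons, List.foldl_nil]
      set p := List.foldl stepCut ([], []) blk with hp
      by_cases hc : pyIsSep s = true ∧ p.2.length ≥ 2
      · have hst : stepCut p s = (p.1 ++ [p.2.dropLast], [p.2.getLast!, s]) := by
          simp only [stepCut]; rw [if_pos hc]
        rw [hst, if_pos hc]
        simp
      · have hst : stepCut p s = (p.1, p.2 ++ [s]) := by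
          simp only [stepCut]; rw [if_neg hc]
        rw [hst, if_neg hc]
    · have hsw0 : (PySem.Chars.startswith s ['|']) = false := by simpa using hsw
      simp only [blocksB, midS, hsw0, Bool.false_eq_true, if_false, not_false_eq_true, if_true]
      by_cases hb : blk = []
      · subst hb
        simp [ih []]
      · rw [if_neg hb]
        have hC : (List.foldl stepCut ([], []) blk).2 ≠ [] :=
          stepCut_snd_ne blk [] [] (Or.inr hb)
        simp only [List.flatMap_cons, ih []]
        simp [hC]

theorem foldl_cutGo_eq_flatMap (blocks : List (List (List Char)))
    (acc : List (List (List Char))) :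
    blocks.foldl (fun tables block => cutGo block 0 0 tables) acc =
      acc ++ blocks.flatMap (fun b => cutGo b 0 0 []) := by
  induction blocks generalizing acc with
  | nil => simp
  | cons b r ih =>
    simp only [List.foldl_cons, List.flatMap_cons, ih]
    rw [cutGo_spec b 0 0 acc (le_refl 0) (Nat.zero_le _),
        cutGo_spec b 0 0 [] (le_refl 0) (Nat.zero_le _)]
    simp [List.append_assoc]

-- ===== VERDICT (by name: the statement is the Claim_ definition above) =====
theorem splitSubtables_spec : Claim_equal_splitSubtables := by
  intro md _
  unfold Spec_splitSubtables splitSubtables splitSubtables_alt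
  dsimp only
  congr 1
  rw [loopA_eq_midS]
  rw [foldl_cutGo_eq_flatMap]
  have hcut : ∀ b : List (List Char), cutGo b 0 0 [] =
      (List.foldl stepCut ([], []) b).1 ++ [(List.foldl stepCut ([], []) b).2] := by
    intro b
    rw [cutGo_spec b 0 0 [] (le_refl 0) (Nat.zero_le _)]
    simp
  simp only [hcut]
  rw [blocksB_eq_midS]
  simp
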